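-- pv_equiv track=rewrite | github.com/venkatvi/llm_prep | mapreduce/word_count.py | reduce_all_word_length_sums
-- ===== SOURCE A (Python) =====
-- def reduce_all_word_length_sums(
--     all_files_word_stats: list[tuple[int, int]], use_reduce: bool = False
-- ) -> tuple[int, int]:
--     """
--     Aggregate word length sums across multiple files.
--
--     Args:
--         all_files_word_stats: List of (total_chars, num_words) tuples from individual files
--
--     Returns:
--         Tuple of (total_character_count, total_word_count) across all files
--
--     Example:
--         >>> file1_stats = (100, 20)  # 100 chars, 20 words
--         >>> file2_stats = (150, 30)  # 150 chars, 30 words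
--         >>> reduce_all_word_length_sums([file1_stats, file2_stats])
--         (250, 50)
--     """
--     total_character_count = 0
--     total_num_words = 0
--     for per_file_word_stats in all_files_word_stats:
--         character_count, num_words = per_file_word_stats
--         total_character_count += character_count
--         total_num_words += num_words
--     return total_character_count, total_num_words
-- ===== SOURCE B (Python) =====
-- def reduce_all_word_length_sums(
--     all_files_word_stats: list[tuple[int, int]], use_reduce: bool = False
-- ) -> tuple[int, int]:
--     if not all_files_word_stats:
--         return 0, 0
--     chars, words = (sum(col) for col in zip(*all_files_word_stats))
--     return chars, words
-- ===== Notes on version B (the rewrite author's own statement) =====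
-- stated objective: idiomatic
-- what changed: Replaces the row-by-row two-accumulator loop with a column-major transpose (zip(*rows)) followed by one sum per column, with a (0,0) guard for the empty list.
import Mathlib
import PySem

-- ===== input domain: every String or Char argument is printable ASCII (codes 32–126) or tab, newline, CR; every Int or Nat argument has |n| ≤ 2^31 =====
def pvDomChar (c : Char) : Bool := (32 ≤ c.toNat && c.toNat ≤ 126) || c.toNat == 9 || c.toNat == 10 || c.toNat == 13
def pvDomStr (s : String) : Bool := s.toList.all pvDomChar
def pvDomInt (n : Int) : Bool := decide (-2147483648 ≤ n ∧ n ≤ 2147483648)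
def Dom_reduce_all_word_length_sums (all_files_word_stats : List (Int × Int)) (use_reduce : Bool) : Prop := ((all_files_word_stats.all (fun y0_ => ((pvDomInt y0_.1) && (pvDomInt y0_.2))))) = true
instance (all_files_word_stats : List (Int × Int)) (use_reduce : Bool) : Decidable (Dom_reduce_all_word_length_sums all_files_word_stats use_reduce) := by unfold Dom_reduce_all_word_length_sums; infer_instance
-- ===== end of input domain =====

-- ===== PORT A =====
-- B changes only the decomposition (column-wise transpose-then-sum instead of a row loop); objective: idiomatic.
def reduce_all_word_length_sums (all_files_word_stats : List (Int × Int)) (use_reduce : Bool) : Int × Int :=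
  all_files_word_stats.foldl
    (fun (acc : Int × Int) (per_file_word_stats : Int × Int) =>
      (acc.1 + per_file_word_stats.1, acc.2 + per_file_word_stats.2))
    (0, 0)

-- ===== PORT B =====
-- zip(*rows) → the two columns (list of firsts, list of seconds); sum(col) → List.sum
def reduce_all_word_length_sums_alt (all_files_word_stats : List (Int × Int)) (use_reduce : Bool) : Int × Int :=
  if all_files_word_stats.isEmpty then (0, 0)
  else
    ((all_files_word_stats.map Prod.fst).sum, (all_files_word_stats.map Prod.snd).sum)

-- ===== PRECONDITION & SPEC =====
def Spec_reduce_all_word_length_sums (all_files_word_stats : List (Int × Int)) (use_reduce : Bool) (out : Int × Int) : Prop := out = reduce_all_word_length_sums_alt all_files_word_stats use_reduce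
instance (all_files_word_stats : List (Int × Int)) (use_reduce : Bool) (out : Int × Int) : Decidable (Spec_reduce_all_word_length_sums all_files_word_stats use_reduce out) := by unfold Spec_reduce_all_word_length_sums; infer_instance

-- ===== CLAIM (what is proved, stated in full; the proofs are below) =====
def Claim_equal_reduce_all_word_length_sums : Prop := ∀ (all_files_word_stats : List (Int × Int)) (use_reduce : Bool), Dom_reduce_all_word_length_sums all_files_word_stats use_reduce → Spec_reduce_all_word_length_sums all_files_word_stats use_reduce (reduce_all_word_length_sums all_files_word_stats use_reduce)

-- ===== LEMMAS AND PROOFS =====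
theorem pv_foldl_sum (xs : List (Int × Int)) (a b : Int) :
    xs.foldl (fun (acc : Int × Int) (p : Int × Int) => (acc.1 + p.1, acc.2 + p.2)) (a, b)
      = (a + (xs.map Prod.fst).sum, b + (xs.map Prod.snd).sum) := by
  induction xs generalizing a b with
  | nil => simp
  | cons h t ih => simp [List.foldl, ih]; constructor <;> ring

-- ===== VERDICT (by name: the statement is the Claim_ definition above) =====
theorem reduce_all_word_length_sums_spec : Claim_equal_reduce_all_word_length_sums := by
  intro xs u _
  unfold Spec_reduce_all_word_length_sums reduce_all_word_length_sums reduce_all_word_length_sums_alt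
  cases xs with
  | nil => simp
  | cons h t =>
    obtain ⟨a, b⟩ := h
    simp [pv_foldl_sum]
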